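-- pv_equiv track=rewrite | github.com/anmyeondo/Problem-Solve | 프로그래머스/lv2/131127. 할인 행사/할인 행사.py | solution
-- ===== SOURCE A (Python) =====
-- from collections import Counter
--
-- def solution(want, number, discount):
--     answer = 0
--     goal = {}
--
--     # 가격 매칭
--     for i in range(len(want)):
--         goal[want[i]] = number[i]
--
--     for i in range(len(discount)):
--         product = Counter(discount[i:min(i+10, len(discount))])
--         flag = 1
--         for key in goal.keys():
--             if (key not in product) or (product[key] < goal[key]):
--                 flag = 0
--                 break
--
--         if flag:
--             answer += 1
--
--     return answer
-- ===== SOURCE B (Python) =====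
-- def solution(want, number, discount):
--     goal = dict(zip(want, number))
--     n = len(discount)
--     # counts of the current window discount[i:i+10]; keys with count 0 are removed
--     cnt = {}
--     for x in discount[:10]:
--         cnt[x] = cnt.get(x, 0) + 1
--     answer = 0
--     for i in range(n):
--         if all(k in cnt and cnt[k] >= q for k, q in goal.items()):
--             answer += 1
--         x = discount[i]
--         cnt[x] -= 1
--         if cnt[x] == 0:
--             del cnt[x]
--         if i + 10 < n:
--             y = discount[i + 10]
--             cnt[y] = cnt.get(y, 0) + 1
--     return answer
-- ===== Notes on version B (the rewrite author's own statement) =====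
-- stated objective: faster
-- what changed: B replaces A's per-index rebuild of a Counter over discount[i:i+10] with one sliding-window count dict maintained incrementally (decrement the leaving item, drop zero counts, increment the entering item), checking each window against the goal dict directly; Pre_ excludes only the inputs where len(number) < len(want), on which A raises IndexError.
import Mathlib
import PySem

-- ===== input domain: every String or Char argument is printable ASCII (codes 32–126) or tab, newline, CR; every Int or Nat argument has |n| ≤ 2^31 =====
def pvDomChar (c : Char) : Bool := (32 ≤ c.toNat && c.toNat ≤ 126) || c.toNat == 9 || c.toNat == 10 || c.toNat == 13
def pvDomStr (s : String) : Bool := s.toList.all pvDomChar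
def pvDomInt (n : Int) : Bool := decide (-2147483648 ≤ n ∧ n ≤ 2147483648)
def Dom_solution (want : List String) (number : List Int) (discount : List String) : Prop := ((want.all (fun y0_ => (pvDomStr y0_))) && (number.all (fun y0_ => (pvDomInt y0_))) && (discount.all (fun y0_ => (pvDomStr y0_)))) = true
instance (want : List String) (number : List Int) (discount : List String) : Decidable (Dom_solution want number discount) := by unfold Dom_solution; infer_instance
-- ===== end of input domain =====

-- B replaces A's per-window Counter rebuild with a single sliding-window count dict maintained incrementally; equal return value wherever A returns (Pre_ excludes only the IndexError case).


-- ===== PORT A =====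
-- the inner 'for key in goal.keys(): … break' loop: returns 0 on the first failing key, else 1
def checkFlag (goal product : PySem.Dict String Int) : List String → Int
  | [] => 1
  | k :: ks =>
      if product.contains k = false ∨ product.getD k 0 < goal.getD k 0 then 0
      else checkFlag goal product ks

-- the body of A's 'for i in range(len(discount))' loop
def aStep (goal : PySem.Dict String Int) (discount : List String) (answer : Int) (i : Nat) : Int :=
  let product := PySem.Dict.counter
    (PySem.List.slice discount (some (i : Int)) (some (min ((i : Int) + 10) (PySem.List.len discount))))
  let flag := checkFlag goal product goal.keys
  if flag ≠ 0 then answer + 1 else answer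

def solution (want : List String) (number : List Int) (discount : List String) : Int :=
  let goal : PySem.Dict String Int :=
    (List.range want.length).foldl
      (fun (g : PySem.Dict String Int) (i : Nat) =>
        g.insert ((PySem.List.pyGet? want (i : Int)).getD "")
                 ((PySem.List.pyGet? number (i : Int)).getD 0)) PySem.Dict.empty
  (List.range discount.length).foldl (aStep goal discount) 0

-- ===== PORT B =====
-- the body of B's 'for i in range(n)' loop; state = (answer, cnt).
-- Python's 'cnt[x] -= 1' is ported as getD with default 0: x = discount[i] is always a key of cnt
-- (it lies in the current window), so the default is never consulted and no KeyError occurs.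
def bStep (goal : PySem.Dict String Int) (discount : List String) (n : Nat)
    (st : Int × PySem.Dict String Int) (i : Nat) : Int × PySem.Dict String Int :=
  let answer := if goal.items.all (fun kv => st.2.contains kv.1 && decide (kv.2 ≤ st.2.getD kv.1 0))
                then st.1 + 1 else st.1
  let x := (PySem.List.pyGet? discount (i : Int)).getD ""
  let c := st.2.getD x 0 - 1
  let cnt1 := if c = 0 then st.2.erase x else st.2.insert x c
  let cnt2 := if (i : Int) + 10 < (n : Int) then
      let y := (PySem.List.pyGet? discount ((i : Int) + 10)).getD ""
      cnt1.insert y (cnt1.getD y 0 + 1)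
    else cnt1
  (answer, cnt2)

def solution_alt (want : List String) (number : List Int) (discount : List String) : Int :=
  let goal : PySem.Dict String Int :=
    (want.zip number).foldl (fun g wq => g.insert wq.1 wq.2) PySem.Dict.empty
  let n := discount.length
  let cnt0 : PySem.Dict String Int :=
    (PySem.List.slice discount none (some 10)).foldl
      (fun (c : PySem.Dict String Int) x => c.insert x (c.getD x 0 + 1)) PySem.Dict.empty
  ((List.range n).foldl (bStep goal discount n) (0, cnt0)).1

-- ===== PRECONDITION & SPEC =====
-- Pre_ excludes exactly the inputs with len(number) < len(want), on which A raises IndexError.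
def Pre_solution (want : List String) (number : List Int) (discount : List String) : Prop :=
  want.length ≤ number.length
instance (want : List String) (number : List Int) (discount : List String) : Decidable (Pre_solution want number discount) := by unfold Pre_solution; infer_instance
def pvWitness_solution : List String × List Int × List String := (["a"], [2], ["a", "b", "a"])

def Spec_solution (want : List String) (number : List Int) (discount : List String) (out : Int) : Prop := out = solution_alt want number discount
instance (want : List String) (number : List Int) (discount : List String) (out : Int) : Decidable (Spec_solution want number discount out) := by unfold Spec_solution; infer_instance

-- ===== CLAIM (what is proved, stated in full; the proofs are below) =====
def Claim_equal_solution : Prop := ∀ (want : List String) (number : List Int) (discount : List String), Dom_solution want number discount → Pre_solution want number discount → Spec_solution want number discount (solution want number discount)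
-- ===== LEMMAS AND PROOFS =====

-- cnt represents the multiset of the list l (counts agree; zero-count keys are absent)
def CRep (c : PySem.Dict String Int) (l : List String) : Prop :=
  ∀ k, c.getD k 0 = (l.count k : Int) ∧ (c.contains k = true ↔ k ∈ l)

-- the current window of B at start index j
def W (discount : List String) (j : Nat) : List String := (discount.drop j).take 10

-- erase: lookups at other keys are untouched, the erased key is gone
lemma get?_erase (d : PySem.Dict String Int) (k k' : String) :
    (d.erase k).get? k' = if k' = k then none else d.get? k' := by
  simp only [PySem.Dict.erase, PySem.Dict.get?, List.find?_filter]
  split_ifs with h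
  · subst h
    rw [List.find?_eq_none.mpr ?_]
    · rfl
    · intro p _
      simp only [Bool.not_eq_eq_eq_not, Bool.not_true, decide_eq_true_eq, not_and]
      intro h1 h2
      simp [h2] at h1
  · have hfun : ∀ p : String × Int,
        (decide ((!(p.1 == k)) = true ∧ (p.1 == k') = true)) = (p.1 == k') := by
      intro p
      by_cases hp : p.1 = k'
      · simp [hp, h]
      · simp [hp]
    simp only [hfun]

lemma getD_erase (d : PySem.Dict String Int) (k k' : String) (v : Int) :
    (d.erase k).getD k' v = if k' = k then v else d.getD k' v := by
  simp only [PySem.Dict.getD, get?_erase]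
  split_ifs <;> simp

lemma contains_erase (d : PySem.Dict String Int) (k k' : String) :
    ((d.erase k).contains k' = true) ↔ (k' ≠ k ∧ d.contains k' = true) := by
  rw [PySem.Dict.contains_eq_isSome_get?, PySem.Dict.contains_eq_isSome_get?, get?_erase]
  split_ifs with h <;> simp [h]

-- adding one occurrence of y
lemma CRep_incr (c : PySem.Dict String Int) (l : List String) (y : String) (h : CRep c l) :
    CRep (c.insert y (c.getD y 0 + 1)) (l ++ [y]) := by
  intro k
  rcases h k with ⟨h1, h2⟩
  rcases h y with ⟨hy1, _⟩
  constructor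
  · rw [PySem.Dict.getD_insert]
    by_cases hk : k = y
    · subst hk; simp [hy1, List.count_append]
    · simp [hk, h1, List.count_append, Ne.symm hk]
  · rw [PySem.Dict.contains_insert]
    by_cases hk : k = y
    · subst hk; simp
    · simp [hk, h2, Ne.symm hk]

-- removing the front occurrence x
lemma CRep_decr (c : PySem.Dict String Int) (x : String) (l : List String) (h : CRep c (x :: l)) :
    CRep (if c.getD x 0 - 1 = 0 then c.erase x else c.insert x (c.getD x 0 - 1)) l := by
  rcases h x with ⟨hx1, _⟩
  have hx1' : c.getD x 0 - 1 = (l.count x : Int) := by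
    rw [hx1]; simp [List.count_cons]
  intro k
  by_cases hk : k = x
  · subst hk
    split_ifs with h0
    · have hcnt : l.count k = 0 := by omega
      refine ⟨by rw [getD_erase]; simp [hcnt], ?_⟩
      rw [contains_erase]
      simp [List.count_eq_zero.mp hcnt]
    · refine ⟨by rw [PySem.Dict.getD_insert]; simp [hx1'], ?_⟩
      rw [PySem.Dict.contains_insert]
      have : l.count k ≠ 0 := by omega
      simp [List.count_pos_iff.mp (by omega : 0 < l.count k)]
  · rcases h k with ⟨h1, h2⟩
    have hxk : x ≠ k := fun e => hk e.symm
    have hcount : (x :: l).count k = l.count k := by simp [List.count_cons, hxk]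
    split_ifs with h0
    · refine ⟨?_, ?_⟩
      · rw [getD_erase, if_neg hk, h1, hcount]
      · rw [contains_erase]
        constructor
        · rintro ⟨_, hc⟩
          rcases List.mem_cons.mp (h2.mp hc) with hm' | hm'
          · exact absurd hm' hk
          · exact hm'
        · intro hm; exact ⟨hk, h2.mpr (List.mem_cons_of_mem _ hm)⟩
    · refine ⟨?_, ?_⟩
      · rw [PySem.Dict.getD_insert, if_neg hk, h1, hcount]
      · rw [PySem.Dict.contains_insert]
        have hbe : (k == x) = false := by simp [hk]
        rw [hbe, Bool.false_or]
        constructor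
        · intro hc
          rcases List.mem_cons.mp (h2.mp hc) with hm' | hm'
          · exact absurd hm' hk
          · exact hm'
        · intro hm; exact h2.mpr (List.mem_cons_of_mem _ hm)

-- the initial dict represents the first window
lemma CRep_init (l : List String) :
    CRep (l.foldl (fun (c : PySem.Dict String Int) x => c.insert x (c.getD x 0 + 1)) PySem.Dict.empty) l := by
  rw [PySem.Dict.foldl_insert_getD_add_one_eq_counter]
  intro k
  refine ⟨PySem.Dict.getD_counter l k, ?_⟩
  rw [PySem.Dict.contains_counter]
  simp

-- checkFlag ≠ 0 iff every key passes A's membership-and-quantity test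
lemma checkFlag_eq_one_iff (goal product : PySem.Dict String Int) (ks : List String) :
    checkFlag goal product ks ≠ 0 ↔
      ∀ k ∈ ks, product.contains k = true ∧ goal.getD k 0 ≤ product.getD k 0 := by
  induction ks with
  | nil => simp [checkFlag]
  | cons k ks ih =>
    simp only [checkFlag, List.mem_cons]
    split_ifs with h
    · simp only [ne_eq, not_true_eq_false, false_iff]
      intro hall
      rcases hall k (Or.inl rfl) with ⟨h1, h2⟩
      rcases h with h | h
      · rw [h1] at h; simp at h
      · omega
    · constructor
      · intro hck x hx
        rcases hx with rfl | hx
        · refine ⟨?_, ?_⟩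
          · cases hc : product.contains x
            · exact absurd (Or.inl hc) h
            · rfl
          · by_contra hlt
            exact h (Or.inr (not_le.mp hlt))
        · exact (ih.mp hck) x hx
      · intro hall
        exact ih.mpr (fun x hx => hall x (Or.inr hx))

-- the two goal-building loops produce the same dict when number is long enough
lemma goal_eq (want : List String) (number : List Int) (h : want.length ≤ number.length)
    (d : PySem.Dict String Int) :
    (List.range want.length).foldl
      (fun (g : PySem.Dict String Int) (i : Nat) =>
        g.insert ((PySem.List.pyGet? want (i : Int)).getD "")
                 ((PySem.List.pyGet? number (i : Int)).getD 0)) d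
    = (want.zip number).foldl (fun g wq => g.insert wq.1 wq.2) d := by
  induction want generalizing number d with
  | nil => simp
  | cons w ws ih =>
    cases number with
    | nil => simp at h
    | cons q qs =>
      simp only [List.length_cons, List.range_succ_eq_map, List.foldl_cons, List.foldl_map,
        List.zip_cons_cons]
      have hd : ((d.insert ((PySem.List.pyGet? (w :: ws) ((0 : Nat) : Int)).getD "")
          ((PySem.List.pyGet? (q :: qs) ((0 : Nat) : Int)).getD 0))) = d.insert w q := by
        simp
      rw [hd, ← ih qs (by simpa using h)]
      apply PySem.List.foldl_congr_mem
      intro acc i _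
      simp [PySem.List.pyGet?_natCast]

-- A's slice at index j is B's window
lemma slice_eq_W (discount : List String) (j : Nat) :
    PySem.List.slice discount (some (j : Int)) (some (min ((j : Int) + 10) (PySem.List.len discount)))
      = W discount j := by
  have hmin : min ((j : Int) + 10) (PySem.List.len discount)
      = ((min (j + 10) discount.length : Nat) : Int) := by
    rw [PySem.List.len_eq]; push_cast; omega
  rw [hmin, PySem.List.slice_natCast, W]
  by_cases h : j + 10 ≤ discount.length
  · congr 1; omega
  · rw [List.take_of_length_le (by simp; omega), List.take_of_length_le (by simp; omega)]

-- with CRep cnt (W j), A's per-window test and B's test agree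
lemma cond_iff (G : PySem.Dict String Int) (hnd : G.keys.Nodup) (discount : List String)
    (j : Nat) (cnt : PySem.Dict String Int) (hrep : CRep cnt (W discount j)) :
    (checkFlag G (PySem.Dict.counter (PySem.List.slice discount (some (j : Int))
        (some (min ((j : Int) + 10) (PySem.List.len discount))))) G.keys ≠ 0)
    ↔ (G.items.all (fun kv => cnt.contains kv.1 && decide (kv.2 ≤ cnt.getD kv.1 0)) = true) := by
  rw [slice_eq_W, checkFlag_eq_one_iff, List.all_eq_true, PySem.Dict.items_eq_map_keys G hnd 0]
  simp only [List.forall_mem_map, Bool.and_eq_true, decide_eq_true_eq]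
  apply forall_congr'
  intro k
  apply forall_congr'
  intro hk
  rcases hrep k with ⟨h1, h2⟩
  rw [PySem.Dict.contains_counter, PySem.Dict.getD_counter, h1, h2, List.contains_iff_mem]

-- sliding the window one step preserves CRep
lemma CRep_step (discount : List String) (n : Nat) (hn : n = discount.length) (j : Nat)
    (hj : j < n) (cnt : PySem.Dict String Int) (hrep : CRep cnt (W discount j)) :
    CRep ((bStep G discount n (ans, cnt) j).2) (W discount (j + 1)) := by
  subst hn
  have hx : (PySem.List.pyGet? discount (j : Int)).getD "" = discount[j] := by
    rw [PySem.List.pyGet?_natCast]; simp [List.getElem?_eq_getElem hj]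
  have hWj : W discount j = discount[j] :: (discount.drop (j + 1)).take 9 := by
    rw [W, List.drop_eq_getElem_cons hj]; rfl
  have hrep' : CRep cnt (discount[j] :: (discount.drop (j + 1)).take 9) := hWj ▸ hrep
  have hdec := CRep_decr cnt discount[j] ((discount.drop (j + 1)).take 9) hrep'
  have hW1 : W discount (j + 1) = (discount.drop (j + 1)).take 9 ++ discount[j + 10]?.toList := by
    rw [W, (by norm_num : (10 : Nat) = 9 + 1), List.take_succ, List.getElem?_drop]
  simp only [bStep, hx]
  by_cases hcond : (j : Int) + 10 < (discount.length : Int)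
  · have hlt : j + 10 < discount.length := by exact_mod_cast hcond
    have hy : (PySem.List.pyGet? discount ((j : Int) + 10)).getD "" = discount[j + 10] := by
      have : ((j : Int) + 10) = ((j + 10 : Nat) : Int) := by push_cast; ring
      rw [this, PySem.List.pyGet?_natCast]; simp [List.getElem?_eq_getElem hlt]
    simp only [hcond, if_true, hy]
    have := CRep_incr _ _ discount[j + 10] hdec
    rw [hW1, List.getElem?_eq_getElem hlt]
    exact this
  · have hge : discount.length ≤ j + 10 := by omega
    simp only [hcond, if_false]
    rw [hW1, List.getElem?_eq_none (by omega : discount.length ≤ j + 10)]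
    simpa using hdec

-- the main fold invariant: answers agree and the window dict stays in CRep
lemma fold_eq (G : PySem.Dict String Int) (hnd : G.keys.Nodup) (discount : List String)
    (m j : Nat) (hm : j + m = discount.length) (ans : Int) (cnt : PySem.Dict String Int)
    (hrep : CRep cnt (W discount j)) :
    ((List.range' j m).foldl (bStep G discount discount.length) (ans, cnt)).1
      = (List.range' j m).foldl (aStep G discount) ans := by
  induction m generalizing j ans cnt with
  | zero => simp
  | succ m ih =>
    rw [List.range'_succ, List.foldl_cons, List.foldl_cons]
    have hj : j < discount.length := by omega
    have hcond := cond_iff G hnd discount j cnt hrep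
    have hrep' := CRep_step discount discount.length rfl j hj cnt hrep (G := G) (ans := ans)
    have hans : (bStep G discount discount.length (ans, cnt) j).1 = aStep G discount ans j := by
      simp only [bStep, aStep]
      rw [if_congr hcond.symm rfl rfl]
    have hst : bStep G discount discount.length (ans, cnt) j
        = ((bStep G discount discount.length (ans, cnt) j).1,
           (bStep G discount discount.length (ans, cnt) j).2) := rfl
    rw [hst, hans]
    exact ih (j + 1) (by omega) _ _ hrep'

-- ===== VERDICT (by name: the statement is the Claim_ definition above) =====
theorem solution_spec : Claim_equal_solution := by
  unfold Claim_equal_solution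
  intro want number discount _ hpre
  unfold Spec_solution
  simp only [solution, solution_alt]
  rw [goal_eq want number hpre]
  set G := (want.zip number).foldl (fun g wq => g.insert wq.1 wq.2) PySem.Dict.empty with hG
  have hnd : G.keys.Nodup := by
    apply PySem.Dict.nodup_keys_foldl_insert_key (want.zip number) Prod.fst (fun _ wq => wq.2)
    simp [PySem.Dict.empty]
  have hslice : PySem.List.slice discount none (some 10) = discount.take 10 := by
    rw [PySem.List.slice_to discount (by norm_num)]; rfl
  have hrep0 : CRep ((PySem.List.slice discount none (some 10)).foldl
      (fun (c : PySem.Dict String Int) x => c.insert x (c.getD x 0 + 1)) PySem.Dict.empty)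
      (W discount 0) := by
    rw [hslice]
    have h0 : W discount 0 = discount.take 10 := by rw [W]; simp
    rw [h0]
    exact CRep_init (discount.take 10)
  rw [List.range_eq_range']
  exact (fold_eq G hnd discount discount.length 0 (by omega) 0 _ hrep0).symm
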